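-- pv_equiv track=rewrite | github.com/Utkarsh4430/steerduplex | src/eval/fdb_v2/eval/eval_single_item.py | extract_first_balanced_json
-- ===== SOURCE A (Python) =====
-- from typing import Any, Dict, List, Optional, Tuple
--
-- def extract_first_balanced_json(text: str) -> Optional[str]:
--     """Extract the first top-level balanced JSON object from arbitrary text.
--
--     Scans for the first '{' and returns the shortest string that balances braces.
--     Returns None if no balanced object is found.
--     """
--     start = text.find("{")
--     if start == -1:
--         return None
--     depth = 0
--     in_str = False
--     escape = False
--     for i in range(start, len(text)):
--         ch = text[i]
--         if in_str:
--             if escape: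
--                 escape = False
--             elif ch == "\\":
--                 escape = True
--             elif ch == '"':
--                 in_str = False
--         else:
--             if ch == '"':
--                 in_str = True
--             elif ch == '{':
--                 depth += 1
--             elif ch == '}':
--                 depth -= 1
--                 if depth == 0:
--                     candidate = text[start : i + 1]
--                     return candidate
--     return None
-- ===== SOURCE B (Python) =====
-- def _structural_braces(text, start):
--     """Pass 1: list of (index, +1/-1) events for braces outside string literals,
--     scanning from position start; string bodies are consumed by an index-jumping
--     inner loop (a backslash skips the next character)."""
--     n = len(text)
--     events = []
--     i = start
--     while i < n:
--         ch = text[i]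
--         if ch == '"':
--             i += 1
--             while i < n:
--                 if text[i] == '\\':
--                     i += 2
--                 elif text[i] == '"':
--                     i += 1
--                     break
--                 else:
--                     i += 1
--         else:
--             if ch == '{':
--                 events.append((i, 1))
--             elif ch == '}':
--                 events.append((i, -1))
--             i += 1
--     return events
--
-- def extract_first_balanced_json(text):
--     """Extract the first top-level balanced JSON object from arbitrary text.
--
--     Two stages: first collect the brace events outside string literals, then a
--     prefix-sum scan over the events returns at the first index where the running
--     depth becomes zero."""
--     start = text.find("{")
--     if start == -1:
--         return None
--     depth = 0
--     for i, d in _structural_braces(text, start):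
--         depth += d
--         if depth == 0:
--             return text[start:i + 1]
--     return None
-- ===== Notes on version B (the rewrite author's own statement) =====
-- stated objective: alternative
-- what changed: A's single fused character loop carrying depth/in_str/escape flags is replaced by two independent stages: a first pass materializes a list of (index, +1/-1) brace events outside string literals (string bodies consumed by index jumps, no flags), and a second pass is a plain prefix-sum scan over that event list returning at the first zero.
import Mathlib
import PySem

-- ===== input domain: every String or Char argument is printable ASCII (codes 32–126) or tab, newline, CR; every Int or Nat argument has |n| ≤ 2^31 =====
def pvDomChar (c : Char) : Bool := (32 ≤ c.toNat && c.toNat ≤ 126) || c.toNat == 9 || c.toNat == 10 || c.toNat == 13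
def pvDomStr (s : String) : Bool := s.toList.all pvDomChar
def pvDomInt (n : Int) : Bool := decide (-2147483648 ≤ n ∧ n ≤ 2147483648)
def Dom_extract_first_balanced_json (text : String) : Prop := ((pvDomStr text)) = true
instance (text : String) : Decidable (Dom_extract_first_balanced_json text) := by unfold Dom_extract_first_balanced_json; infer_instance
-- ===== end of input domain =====

-- B replaces A's fused flag-driven scan by two stages: a pass collecting the (index, ±1)
-- brace events outside string literals, then a prefix-sum scan over that event list
-- (alternative decomposition, same cost); return value only, no mutation.

-- ===== PORT A =====
-- the 'for i in range(start, len(text))' loop of A, as structural recursion over the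
-- remaining characters with the running index i and the state (depth, in_str, escape)
def pvLoopA (text : String) (start : Nat) : List Char → Nat → Int → Bool → Bool → Option String
  | [], _, _, _, _ => none
  | ch :: rest, i, depth, in_str, escape =>
    if in_str then
      if escape then pvLoopA text start rest (i+1) depth true false
      else if ch = '\\' then pvLoopA text start rest (i+1) depth true true
      else if ch = '"' then pvLoopA text start rest (i+1) depth false false
      else pvLoopA text start rest (i+1) depth in_str escape
    else
      if ch = '"' then pvLoopA text start rest (i+1) depth true escape
      else if ch = '{' then pvLoopA text start rest (i+1) (depth+1) in_str escape
      else if ch = '}' then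
        if depth - 1 = 0 then some (PySem.Str.slice text (some (start : Int)) (some ((i : Int) + 1)))
        else pvLoopA text start rest (i+1) (depth-1) in_str escape
      else pvLoopA text start rest (i+1) depth in_str escape

def extract_first_balanced_json (text : String) : Option String :=
  let start := PySem.Str.find text "{"
  if start = -1 then none
  else pvLoopA text start.toNat (text.toList.drop start.toNat) start.toNat 0 false false

-- ===== PORT B =====
-- the inner 'while i < n' loop of pass 1 that consumes a string body (i is just past the
-- opening quote); on a backslash Python does i += 2, i.e. it also drops the next character
def pvSkipStr : List Char → Nat → List Char × Nat
  | [], i => ([], i)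
  | c :: rest, i =>
    if c = '\\' then
      match rest with
      | [] => ([], i+2)
      | _ :: rest' => pvSkipStr rest' (i+2)
    else if c = '"' then (rest, i+1)
    else pvSkipStr rest (i+1)

-- pass 1 ('_structural_braces'): the outer 'while i < n' loop collecting brace events;
-- the fuel argument is only a totality guard (instantiated with the length of the
-- remaining characters, which strictly decreases, so the 'fuel = 0' branch never fires)
def pvBraces : Nat → List Char → Nat → List (Nat × Int)
  | 0, _, _ => []
  | fuel+1, cs, i =>
    match cs with
    | [] => []
    | c :: rest =>
      if c = '"' then pvBraces fuel (pvSkipStr rest (i+1)).1 (pvSkipStr rest (i+1)).2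
      else if c = '{' then (i, 1) :: pvBraces fuel rest (i+1)
      else if c = '}' then (i, -1) :: pvBraces fuel rest (i+1)
      else pvBraces fuel rest (i+1)

-- pass 2: the 'for i, d in …' prefix-sum scan over the event list
def pvScan (text : String) (start : Nat) : List (Nat × Int) → Int → Option String
  | [], _ => none
  | (i, d) :: rest, depth =>
    if depth + d = 0 then some (PySem.Str.slice text (some (start : Int)) (some ((i : Int) + 1)))
    else pvScan text start rest (depth + d)

def extract_first_balanced_json_alt (text : String) : Option String :=
  let start := PySem.Str.find text "{"
  if start = -1 then none
  else
    let cs := text.toList.drop start.toNat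
    pvScan text start.toNat (pvBraces cs.length cs start.toNat) 0

-- ===== PRECONDITION & SPEC =====
def Spec_extract_first_balanced_json (text : String) (out : Option String) : Prop := out = extract_first_balanced_json_alt text
instance (text : String) (out : Option String) : Decidable (Spec_extract_first_balanced_json text out) := by unfold Spec_extract_first_balanced_json; infer_instance

-- ===== CLAIM (what is proved, stated in full; the proofs are below) =====
def Claim_equal_extract_first_balanced_json : Prop := ∀ (text : String), Dom_extract_first_balanced_json text → Spec_extract_first_balanced_json text (extract_first_balanced_json text)

-- ===== LEMMAS AND PROOFS =====

theorem pvSkipStr_backslash (rest : List Char) (i : Nat) :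
    pvSkipStr ('\\' :: rest) i = pvSkipStr rest.tail (i+2) := by
  cases rest <;> simp [pvSkipStr]

-- the string-consuming loop never lengthens the remaining character list
theorem pvSkipStr_len_le (cs : List Char) (i : Nat) : (pvSkipStr cs i).1.length ≤ cs.length := by
  induction cs, i using pvSkipStr.induct with
  | case1 i => simp [pvSkipStr]
  | case2 i => simp [pvSkipStr]
  | case3 i hd rest' ih =>
      rw [pvSkipStr_backslash]
      exact le_trans ih (by simp; omega)
  | case4 rest i h =>
      unfold pvSkipStr
      rw [if_neg h, if_pos rfl]
      simp
  | case5 c rest i h1 h2 ih =>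
      unfold pvSkipStr
      rw [if_neg h1, if_neg h2]
      exact le_trans ih (Nat.le_succ _)

-- A's escape state just consumes one character and returns to in-string scanning
theorem pvLoopA_escape (text : String) (start : Nat) (cs : List Char) (i : Nat) (d : Int) :
    pvLoopA text start cs i d true true = pvLoopA text start cs.tail (i+1) d true false := by
  cases cs <;> simp [pvLoopA]

-- joint invariant (for depth ≥ 1, which A's loop maintains after the opening brace):
-- outside a string A's fused loop equals B's prefix-sum scan over B's event list of the
-- remaining characters; inside a string it equals the scan over the event list of what
-- remains after B's pvSkipStr
theorem pvLoopAB (text : String) (start : Nat) :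
    ∀ (n : Nat) (cs : List Char), cs.length ≤ n →
      (∀ (fuel i : Nat) (d : Int), cs.length ≤ fuel → 1 ≤ d →
        pvLoopA text start cs i d false false = pvScan text start (pvBraces fuel cs i) d) ∧
      (∀ (fuel i : Nat) (d : Int), (pvSkipStr cs i).1.length ≤ fuel → 1 ≤ d →
        pvLoopA text start cs i d true false =
          pvScan text start (pvBraces fuel (pvSkipStr cs i).1 (pvSkipStr cs i).2) d) := by
  intro n
  induction n with
  | zero =>
      intro cs h
      have hc : cs = [] := List.eq_nil_of_length_eq_zero (Nat.le_zero.mp h)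
      subst hc
      refine ⟨fun fuel i d _ _ => by cases fuel <;> simp [pvLoopA, pvBraces, pvScan],
              fun fuel i d _ _ => by cases fuel <;> simp [pvLoopA, pvBraces, pvScan, pvSkipStr]⟩
  | succ n ih =>
      intro cs h
      cases cs with
      | nil =>
          refine ⟨fun fuel i d _ _ => by cases fuel <;> simp [pvLoopA, pvBraces, pvScan],
                  fun fuel i d _ _ => by cases fuel <;> simp [pvLoopA, pvBraces, pvScan, pvSkipStr]⟩
      | cons c rest =>
        have hr : rest.length ≤ n := Nat.lt_succ_iff.mp (lt_of_lt_of_le (by simp) h)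
        constructor
        · intro fuel i d hf hd
          cases fuel with
          | zero => exact absurd hf (by simp)
          | succ f =>
            have hf' : rest.length ≤ f := by simp at hf; omega
            by_cases hq : c = '"'
            · simp only [pvLoopA, pvBraces, hq, Bool.false_eq_true, if_false, if_pos]
              exact (ih rest hr).2 f (i+1) d (le_trans (pvSkipStr_len_le rest (i+1)) hf') hd
            · by_cases ho : c = '{'
              · simp only [pvLoopA, pvBraces, pvScan, if_neg hq, if_pos ho, Bool.false_eq_true, if_false]
                rw [if_neg (by omega : ¬ d + 1 = 0)]
                exact (ih rest hr).1 f (i+1) (d+1) hf' (by omega)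
              · by_cases hc : c = '}'
                · simp only [pvLoopA, pvBraces, pvScan, if_neg hq, if_neg ho, if_pos hc, Bool.false_eq_true, if_false]
                  by_cases hz : d - 1 = 0
                  · rw [if_pos hz, if_pos (by omega : d + -1 = 0)]
                  · rw [if_neg hz, if_neg (by omega : ¬ d + -1 = 0)]
                    have : d + -1 = d - 1 := by ring
                    rw [this]
                    exact (ih rest hr).1 f (i+1) (d-1) hf' (by omega)
                · simp only [pvLoopA, pvBraces, if_neg hq, if_neg ho, if_neg hc, Bool.false_eq_true, if_false]
                  exact (ih rest hr).1 f (i+1) d hf' hd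
        · intro fuel i d hf hd
          by_cases hb : c = '\\'
          · subst hb
            rw [pvSkipStr_backslash] at hf ⊢
            have ht : rest.tail.length ≤ n := le_trans (by cases rest <;> simp) hr
            simp only [pvLoopA, if_pos]
            rw [pvLoopA_escape]
            exact (ih rest.tail ht).2 fuel (i+2) d hf hd
          · by_cases hq : c = '"'
            · have hsk : pvSkipStr (c :: rest) i = (rest, i+1) := by
                unfold pvSkipStr; rw [if_neg hb, if_pos hq]
              rw [hsk] at hf ⊢
              simp [pvLoopA, hq]
              exact (ih rest hr).1 fuel (i+1) d hf hd
            · have hsk : pvSkipStr (c :: rest) i = pvSkipStr rest (i+1) := by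
                unfold pvSkipStr; rw [if_neg hb, if_neg hq]; exact pvSkipStr.eq_def _ _
              rw [hsk] at hf ⊢
              simp [pvLoopA, hb, hq]
              exact (ih rest hr).2 fuel (i+1) d hf hd

-- when find succeeds, the character at the found index is the opening brace
theorem pvDrop_find_brace (text : String) (h : ¬ PySem.Str.find text "{" = -1) :
    ∃ rest, text.toList.drop (PySem.Str.find text "{").toNat = '{' :: rest := by
  have h0 : 0 ≤ PySem.Chars.find text.toList "{".toList := by
    have := PySem.Chars.neg_one_le_find text.toList "{".toList
    have : PySem.Chars.find text.toList "{".toList ≠ -1 := by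
      simpa [PySem.Str.find_eq] using h
    omega
  obtain ⟨hpre, -⟩ := PySem.Chars.find_spec h0
  obtain ⟨t, ht⟩ := hpre
  refine ⟨t, ?_⟩
  simp only [PySem.Str.find_eq]
  simpa using ht.symm

-- ===== VERDICT (by name: the statement is the Claim_ definition above) =====
theorem extract_first_balanced_json_spec : Claim_equal_extract_first_balanced_json := by
  intro text _
  unfold Spec_extract_first_balanced_json
  simp only [extract_first_balanced_json, extract_first_balanced_json_alt]
  by_cases h : PySem.Str.find text "{" = -1
  · rw [if_pos h, if_pos h]
  · rw [if_neg h, if_neg h]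
    obtain ⟨rest, hrest⟩ := pvDrop_find_brace text h
    rw [hrest]
    -- unfold the first iteration of each side (the opening brace at 'start'),
    -- then apply the joint invariant with depth 1
    simp only [pvLoopA, pvBraces, List.length_cons, reduceIte, Bool.false_eq_true,
      if_false, zero_add]
    exact (pvLoopAB text (PySem.Str.find text "{").toNat rest.length rest le_rfl).1
      rest.length _ 1 le_rfl le_rfl
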